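-- pv_equiv track=rewrite | github.com/vamsikrishna43/Team-Selector | CCCPRO.py | check_team_balance
-- ===== SOURCE A (Python) =====
-- def check_team_balance(selected):
--     roles = {
--         "batsmen":    0,
--         "allrounders":0,
--         "keepers":    0,
--         "bowlers":    0,
--     }
--     for p in selected:
--         r = p['role']
--         if r in ["Batsman", "WK-Batsman"]:
--             roles["batsmen"] += 1
--         elif r == "All-Rounder":
--             roles["allrounders"] += 1
--         elif r == "Wicket Keeper":
--             roles["keepers"] += 1
--         elif r == "Bowler":
--             roles["bowlers"] += 1
--
--     issues = []
--     if roles["batsmen"] < 3: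
--         issues.append(f"Need at least 3 batsmen (have {roles['batsmen']})")
--     if roles["keepers"] < 1:
--         issues.append(f"Need at least 1 wicket keeper (have {roles['keepers']})")
--     if roles["bowlers"] < 4:
--         issues.append(f"Need at least 4 bowlers (have {roles['bowlers']})")
--
--     return roles, issues
-- ===== SOURCE B (Python) =====
-- def check_team_balance(selected):
--     batsmen = sum(1 for p in selected if p['role'] in ("Batsman", "WK-Batsman"))
--     allrounders = sum(1 for p in selected if p['role'] == "All-Rounder")
--     keepers = sum(1 for p in selected if p['role'] == "Wicket Keeper")
--     bowlers = sum(1 for p in selected if p['role'] == "Bowler")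
--     roles = {
--         "batsmen": batsmen,
--         "allrounders": allrounders,
--         "keepers": keepers,
--         "bowlers": bowlers,
--     }
--     issues = (
--         ([f"Need at least 3 batsmen (have {batsmen})"] if batsmen < 3 else [])
--         + ([f"Need at least 1 wicket keeper (have {keepers})"] if keepers < 1 else [])
--         + ([f"Need at least 4 bowlers (have {bowlers})"] if bowlers < 4 else [])
--     )
--     return roles, issues
-- ===== Notes on version B (the rewrite author's own statement) =====
-- stated objective: alternative
-- what changed: Replaces the single branching accumulation loop over a mutable roles dict with four independent filtered counts (one sum-of-1 scan per category) from which the roles dict and the issues list are assembled directly.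
import Mathlib
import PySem

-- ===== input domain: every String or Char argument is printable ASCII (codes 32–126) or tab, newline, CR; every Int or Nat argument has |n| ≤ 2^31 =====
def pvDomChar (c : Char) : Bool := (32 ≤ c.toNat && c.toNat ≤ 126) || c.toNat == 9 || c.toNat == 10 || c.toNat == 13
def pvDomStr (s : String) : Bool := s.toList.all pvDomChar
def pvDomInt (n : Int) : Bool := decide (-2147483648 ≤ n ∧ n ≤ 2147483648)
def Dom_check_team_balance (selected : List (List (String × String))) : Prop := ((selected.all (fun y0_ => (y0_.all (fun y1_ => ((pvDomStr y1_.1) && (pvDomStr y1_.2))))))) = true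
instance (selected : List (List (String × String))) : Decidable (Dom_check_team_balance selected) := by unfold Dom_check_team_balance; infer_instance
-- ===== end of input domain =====

-- B replaces A's single branching loop over a mutable roles dict by four independent
-- filtered counts from which the roles dict and issues list are assembled (alternative decomposition).

-- ===== PORT A =====
def stepA (roles : PySem.Dict String Int) (p : List (String × String)) : PySem.Dict String Int :=
  let r := (PySem.Dict.mk p).getD "role" ""   -- p['role']; Pre_ excludes the KeyError case
  if r == "Batsman" || r == "WK-Batsman" then roles.modify "batsmen" 0 (· + 1)
  else if r == "All-Rounder" then roles.modify "allrounders" 0 (· + 1)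
  else if r == "Wicket Keeper" then roles.modify "keepers" 0 (· + 1)
  else if r == "Bowler" then roles.modify "bowlers" 0 (· + 1)
  else roles

def check_team_balance (selected : List (List (String × String))) : (List (String × Int)) × List String :=
  let roles0 : PySem.Dict String Int :=
    PySem.Dict.ofList [("batsmen", 0), ("allrounders", 0), ("keepers", 0), ("bowlers", 0)]
  let roles := selected.foldl stepA roles0
  let issues : List String :=
    (if roles.getD "batsmen" 0 < 3 then
      ["Need at least 3 batsmen (have " ++ PySem.Int.toStr (roles.getD "batsmen" 0) ++ ")"] else []) ++
    (if roles.getD "keepers" 0 < 1 then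
      ["Need at least 1 wicket keeper (have " ++ PySem.Int.toStr (roles.getD "keepers" 0) ++ ")"] else []) ++
    (if roles.getD "bowlers" 0 < 4 then
      ["Need at least 4 bowlers (have " ++ PySem.Int.toStr (roles.getD "bowlers" 0) ++ ")"] else [])
  (roles.items, issues)

-- ===== PORT B =====
def check_team_balance_alt (selected : List (List (String × String))) : (List (String × Int)) × List String :=
  let batsmen : Int := selected.countP (fun p => (PySem.Dict.mk p).getD "role" "" == "Batsman" || (PySem.Dict.mk p).getD "role" "" == "WK-Batsman")
  let allrounders : Int := selected.countP (fun p => (PySem.Dict.mk p).getD "role" "" == "All-Rounder")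
  let keepers : Int := selected.countP (fun p => (PySem.Dict.mk p).getD "role" "" == "Wicket Keeper")
  let bowlers : Int := selected.countP (fun p => (PySem.Dict.mk p).getD "role" "" == "Bowler")
  let roles : List (String × Int) :=
    [("batsmen", batsmen), ("allrounders", allrounders), ("keepers", keepers), ("bowlers", bowlers)]
  let issues : List String :=
    (if batsmen < 3 then ["Need at least 3 batsmen (have " ++ PySem.Int.toStr batsmen ++ ")"] else []) ++
    (if keepers < 1 then ["Need at least 1 wicket keeper (have " ++ PySem.Int.toStr keepers ++ ")"] else []) ++
    (if bowlers < 4 then ["Need at least 4 bowlers (have " ++ PySem.Int.toStr bowlers ++ ")"] else [])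
  (roles, issues)

-- ===== PRECONDITION & SPEC =====
-- A (and B) raise KeyError on a player dict without a 'role' key; Pre_ excludes exactly those inputs.
def Pre_check_team_balance (selected : List (List (String × String))) : Prop :=
  (selected.all (fun p => ((PySem.Dict.mk p).get? "role").isSome)) = true
instance (selected : List (List (String × String))) : Decidable (Pre_check_team_balance selected) := by
  unfold Pre_check_team_balance; infer_instance
def pvWitness_check_team_balance : (List (List (String × String))) :=
  [[("role", "Batsman"), ("name", "a")], [("role", "Bowler")], [("role", "Wicket Keeper")]]
def Spec_check_team_balance (selected : List (List (String × String))) (out : (List (String × Int)) × List String) : Prop := out = check_team_balance_alt selected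
instance (selected : List (List (String × String))) (out : (List (String × Int)) × List String) : Decidable (Spec_check_team_balance selected out) := by unfold Spec_check_team_balance; infer_instance

-- ===== CLAIM (what is proved, stated in full; the proofs are below) =====
def Claim_equal_check_team_balance : Prop := ∀ (selected : List (List (String × String))), Dom_check_team_balance selected → Pre_check_team_balance selected → Spec_check_team_balance selected (check_team_balance selected)

-- ===== LEMMAS AND PROOFS =====

def mk4 (b a k w : Int) : PySem.Dict String Int :=
  PySem.Dict.mk [("batsmen", b), ("allrounders", a), ("keepers", k), ("bowlers", w)]

theorem mk4_congr {b a k w b' a' k' w' : Int} (hb : b = b') (ha : a = a') (hk : k = k') (hw : w = w') :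
    mk4 b a k w = mk4 b' a' k' w' := by rw [hb, ha, hk, hw]

theorem mk4_modify_bat (b a k w : Int) : (mk4 b a k w).modify "batsmen" 0 (· + 1) = mk4 (b + 1) a k w := rfl
theorem mk4_modify_all (b a k w : Int) : (mk4 b a k w).modify "allrounders" 0 (· + 1) = mk4 b (a + 1) k w := rfl
theorem mk4_modify_kee (b a k w : Int) : (mk4 b a k w).modify "keepers" 0 (· + 1) = mk4 b a (k + 1) w := rfl
theorem mk4_modify_bow (b a k w : Int) : (mk4 b a k w).modify "bowlers" 0 (· + 1) = mk4 b a k (w + 1) := rfl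

theorem check_team_balance_loop (selected : List (List (String × String))) (b a k w : Int) :
    selected.foldl stepA (mk4 b a k w)
    = mk4
      (b + selected.countP (fun p => (PySem.Dict.mk p).getD "role" "" == "Batsman" || (PySem.Dict.mk p).getD "role" "" == "WK-Batsman"))
      (a + selected.countP (fun p => (PySem.Dict.mk p).getD "role" "" == "All-Rounder"))
      (k + selected.countP (fun p => (PySem.Dict.mk p).getD "role" "" == "Wicket Keeper"))
      (w + selected.countP (fun p => (PySem.Dict.mk p).getD "role" "" == "Bowler")) := by
  induction selected generalizing b a k w with
  | nil => simp [List.countP_nil]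
  | cons p rest ih =>
    simp only [List.foldl_cons, List.countP_cons]
    have hstep : stepA (mk4 b a k w) p =
        let r := (PySem.Dict.mk p).getD "role" ""
        if r == "Batsman" || r == "WK-Batsman" then mk4 (b + 1) a k w
        else if r == "All-Rounder" then mk4 b (a + 1) k w
        else if r == "Wicket Keeper" then mk4 b a (k + 1) w
        else if r == "Bowler" then mk4 b a k (w + 1)
        else mk4 b a k w := by
      simp only [stepA, mk4_modify_bat, mk4_modify_all, mk4_modify_kee, mk4_modify_bow]
    rw [hstep]
    set r := (PySem.Dict.mk p).getD "role" "" with hr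
    by_cases h1 : (r == "Batsman" || r == "WK-Batsman") = true
    · have hv : r = "Batsman" ∨ r = "WK-Batsman" := by
        have h := h1
        simp only [Bool.or_eq_true, beq_iff_eq] at h
        exact h
      have e2 : (r == "All-Rounder") = false := by rcases hv with h | h <;> simp [h]
      have e3 : (r == "Wicket Keeper") = false := by rcases hv with h | h <;> simp [h]
      have e4 : (r == "Bowler") = false := by rcases hv with h | h <;> simp [h]
      rw [if_pos h1, ih]
      apply mk4_congr <;> simp [h1, e2, e3, e4] <;> omega
    · rw [if_neg h1]
      by_cases h2 : (r == "All-Rounder") = true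
      · have h : r = "All-Rounder" := eq_of_beq h2
        have e3 : (r == "Wicket Keeper") = false := by simp [h]
        have e4 : (r == "Bowler") = false := by simp [h]
        rw [if_pos h2, ih]
        apply mk4_congr <;> simp [h1, h2, e3, e4] <;> omega
      · rw [if_neg h2]
        by_cases h3 : (r == "Wicket Keeper") = true
        · have h : r = "Wicket Keeper" := eq_of_beq h3
          have e4 : (r == "Bowler") = false := by simp [h]
          rw [if_pos h3, ih]
          apply mk4_congr <;> simp [h1, h2, h3, e4] <;> omega
        · rw [if_neg h3]
          by_cases h4 : (r == "Bowler") = true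
          · rw [if_pos h4, ih]
            apply mk4_congr <;> simp [h1, h2, h3, h4] <;> omega
          · rw [if_neg h4, ih]
            apply mk4_congr <;> simp [h1, h2, h3, h4]

theorem mk4_getD_bat (b a k w : Int) : (mk4 b a k w).getD "batsmen" 0 = b := rfl
theorem mk4_getD_kee (b a k w : Int) : (mk4 b a k w).getD "keepers" 0 = k := rfl
theorem mk4_getD_bow (b a k w : Int) : (mk4 b a k w).getD "bowlers" 0 = w := rfl
theorem mk4_items (b a k w : Int) :
    (mk4 b a k w).items = [("batsmen", b), ("allrounders", a), ("keepers", k), ("bowlers", w)] := rfl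

-- ===== VERDICT (by name: the statement is the Claim_ definition above) =====
theorem check_team_balance_spec : Claim_equal_check_team_balance := by
  intro selected _ _
  show check_team_balance selected = check_team_balance_alt selected
  have h0 : (PySem.Dict.ofList [("batsmen", (0:Int)), ("allrounders", 0), ("keepers", 0), ("bowlers", 0)]) = mk4 0 0 0 0 := rfl
  simp only [check_team_balance, check_team_balance_alt, h0, check_team_balance_loop,
    mk4_getD_bat, mk4_getD_kee, mk4_getD_bow, mk4_items, zero_add]
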